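-- pv_equiv track=rewrite | github.com/natalka1122/advent_of_code | 2015/20/main1.py | f
-- ===== SOURCE A (Python) =====
-- def f(n: int) -> int:
--     the_list = [0] * (n + 1)
--     for i in range(1, n + 1):
--         for j in range(i, n + 1, i):
--             the_list[j] += i
--     for i in range(len(the_list)):
--         if the_list[i] >= n:
--             return i
--     raise NotImplementedError
-- ===== SOURCE B (Python) =====
-- def f(n: int) -> int:
--     for i in range(n + 1):
--         total = 0
--         d = 1
--         while d * d <= i:
--             if i % d == 0:
--                 total += d
--                 q = i // d
--                 if q != d:
--                     total += q
--             d += 1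
--         if total >= n:
--             return i
--     raise NotImplementedError
-- ===== Notes on version B (the rewrite author's own statement) =====
-- stated objective: alternative
-- what changed: Replaces the global harmonic sieve table over the whole range with an independent per-index divisor sum computed by trial division up to the square root, scanning indices upward and stopping at the first hit.
import Mathlib
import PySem

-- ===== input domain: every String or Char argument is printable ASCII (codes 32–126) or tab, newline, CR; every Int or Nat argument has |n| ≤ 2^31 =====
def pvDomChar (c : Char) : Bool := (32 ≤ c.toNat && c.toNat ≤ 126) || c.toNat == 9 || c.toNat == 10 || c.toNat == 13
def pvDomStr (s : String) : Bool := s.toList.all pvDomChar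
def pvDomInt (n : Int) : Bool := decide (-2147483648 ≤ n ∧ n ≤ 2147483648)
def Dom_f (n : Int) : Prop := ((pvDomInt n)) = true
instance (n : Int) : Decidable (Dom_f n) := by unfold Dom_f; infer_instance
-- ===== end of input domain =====

-- B replaces A's global harmonic sieve table by an independent per-index divisor sum
-- (trial division up to √i) scanned upward; same return value everywhere A returns.

-- ===== PORT A =====
-- the table is a Lean Array (Python's mutable list); every index used is provably
-- in range and nonnegative, so setIfInBounds/getD/toNat are exact here
def f (n : Int) : Int :=
  let the_list : Array Int := Array.replicate (n + 1).toNat 0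
  let the_list :=
    (PySem.List.pyRange 1 (n + 1) 1).foldl
      (fun l i =>
        (PySem.List.pyRange i (n + 1) i).foldl
          (fun (l : Array Int) j => l.setIfInBounds j.toNat (l.getD j.toNat 0 + i)) l)
      the_list
  match (PySem.List.pyRange 0 (the_list.size : Int) 1).find?
      (fun i => decide (n ≤ the_list.getD i.toNat 0)) with
  | some i => i
  | none => 0  -- Python raises NotImplementedError here; excluded by Pre_f

-- ===== PORT B =====
-- the 'while d * d <= i' trial-division loop of Source B (accumulator s = total)
def sigmaGo (i d s : Int) : Int :=
  if _h : d * d ≤ i then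
    sigmaGo i (d + 1)
      (if PySem.Int.mod i d = 0 then
        (if PySem.Int.floordiv i d ≠ d then s + d + PySem.Int.floordiv i d else s + d)
       else s)
  else s
termination_by (i + 1 - d).toNat
decreasing_by
  have hdd : d ≤ d * d := by nlinarith [sq_nonneg d, sq_nonneg (d - 1)]
  omega

def f_alt (n : Int) : Int :=
  match (PySem.List.pyRange 0 (n + 1) 1).find? (fun i => decide (n ≤ sigmaGo i 1 0)) with
  | some i => i
  | none => 0  -- Python raises NotImplementedError here; excluded by Pre_f

-- ===== PRECONDITION & SPEC =====
-- Pre_f excludes exactly the negative inputs, on which the Python A raises NotImplementedError (B raises it too).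
def Pre_f (n : Int) : Prop := 0 ≤ n
instance (n : Int) : Decidable (Pre_f n) := by unfold Pre_f; infer_instance
def pvWitness_f : Int := 10

def Spec_f (n : Int) (out : Int) : Prop := out = f_alt n
instance (n : Int) (out : Int) : Decidable (Spec_f n out) := by unfold Spec_f; infer_instance

-- ===== CLAIM (what is proved, stated in full; the proofs are below) =====
def Claim_equal_f : Prop := ∀ (n : Int), Dom_f n → Pre_f n → Spec_f n (f n)

-- ===== LEMMAS AND PROOFS =====

-- the common value both programs compute at index j: the sum of the divisors of j
noncomputable def divSum (j : Int) : Int := ∑ e ∈ Finset.Icc 1 j, if e ∣ j then e else 0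

-- the divisors of j that B's trial-division loop has not yet collected when it reaches d
noncomputable def pending (j d : Int) : Finset Int :=
  (Finset.Icc 1 j).filter (fun e => e ∣ j ∧ d ≤ e ∧ d ≤ j / e)

lemma getD_setIf (xs : Array Int) (m j : Nat) (v : Int) (h1 : m < xs.size) :
    (xs.setIfInBounds m v).getD j 0 = if j = m then v else xs.getD j 0 := by
  rw [Array.getD_eq_getD_getElem?, Array.getD_eq_getD_getElem?, Array.getElem?_setIfInBounds]
  by_cases hjm : j = m
  · simp [hjm, h1]
  · simp [hjm, Ne.symm hjm]

lemma getD_replicate (k j : Nat) : (Array.replicate k (0 : Int)).getD j 0 = 0 := by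
  rw [Array.getD_eq_getD_getElem?, Array.getElem?_replicate]
  split <;> simp

lemma inner_fold (i : Int) (M : List Int) (l : Array Int)
    (hB : ∀ m ∈ M, 0 ≤ m ∧ m < (l.size : Int)) (hnd : M.Nodup) :
    ((M.foldl (fun l j => Array.setIfInBounds l j.toNat (l.getD j.toNat 0 + i)) l).size
        = l.size) ∧
    ∀ j : Nat,
      (M.foldl (fun l j => Array.setIfInBounds l j.toNat (l.getD j.toNat 0 + i)) l).getD j 0
        = l.getD j 0 + (if (j : Int) ∈ M then i else 0) := by
  induction M generalizing l with
  | nil => simp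
  | cons m M ih =>
    have hm := hB m (List.mem_cons_self)
    have hmsz : m.toNat < l.size := by omega
    have hlen1 : (Array.setIfInBounds l m.toNat (l.getD m.toNat 0 + i)).size = l.size :=
      Array.size_setIfInBounds
    have hB' : ∀ x ∈ M, 0 ≤ x ∧ x <
        ((Array.setIfInBounds l m.toNat (l.getD m.toNat 0 + i)).size : Int) := by
      intro x hx; rw [hlen1]; exact hB x (List.mem_cons_of_mem _ hx)
    obtain ⟨ihlen, ihpt⟩ := ih _ hB' hnd.of_cons
    refine ⟨by rw [List.foldl_cons]; exact ihlen.trans hlen1, ?_⟩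
    intro j
    rw [List.foldl_cons, ihpt j, getD_setIf l m.toNat j _ hmsz]
    have hmM : m ∉ M := (List.nodup_cons.1 hnd).1
    by_cases hjm : (j : Int) = m
    · have hjm' : j = m.toNat := by omega
      subst hjm'
      simp [hjm, hmM]
    · have hjm' : ¬ j = m.toNat := by omega
      simp [hjm, hjm', List.mem_cons]

lemma outer_fold (n : Int) (I : List Int) (l : Array Int)
    (hI : ∀ i ∈ I, 1 ≤ i) (hlen : (l.size : Int) = n + 1) :
    ((I.foldl
        (fun l i =>
          (PySem.List.pyRange i (n + 1) i).foldl
            (fun (l : Array Int) j => Array.setIfInBounds l j.toNat (l.getD j.toNat 0 + i)) l)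
        l).size
      = l.size) ∧
    ∀ j : Nat,
      (I.foldl
          (fun l i =>
            (PySem.List.pyRange i (n + 1) i).foldl
              (fun (l : Array Int) j => Array.setIfInBounds l j.toNat (l.getD j.toNat 0 + i)) l)
          l).getD j 0
        = l.getD j 0
          + (I.map (fun i => if (j : Int) ∈ PySem.List.pyRange i (n + 1) i then i else 0)).sum := by
  induction I generalizing l with
  | nil => simp
  | cons i I ih =>
    have hi : 1 ≤ i := hI i List.mem_cons_self
    have hpos : (0 : Int) < i := by omega
    have hB : ∀ m ∈ PySem.List.pyRange i (n + 1) i, 0 ≤ m ∧ m < (l.size : Int) := by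
      intro m hm
      obtain ⟨h1, h2, _⟩ := (PySem.List.mem_pyRange_iff_of_pos hpos m).1 hm
      constructor <;> omega
    have hnd : (PySem.List.pyRange i (n + 1) i).Nodup := by
      rw [PySem.List.pyRange_of_pos _ _ hpos]
      refine List.Nodup.map ?_ List.nodup_range
      intro a b hab
      have h2 : i * (a : Int) = i * (b : Int) := by exact add_left_cancel hab
      have := mul_left_cancel₀ (by omega : i ≠ 0) h2
      exact_mod_cast this
    obtain ⟨len1, pt1⟩ := inner_fold i (PySem.List.pyRange i (n + 1) i) l hB hnd
    obtain ⟨len2, pt2⟩ := ih _ (fun x hx => hI x (List.mem_cons_of_mem _ hx))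
      (by rw [len1]; exact hlen)
    refine ⟨by rw [List.foldl_cons]; exact len2.trans len1, ?_⟩
    intro j
    rw [List.foldl_cons, pt2 j, pt1 j, List.map_cons, List.sum_cons]
    ring

lemma pending_empty (j d : Int) (hd : 1 ≤ d) (h : ¬ d * d ≤ j) : pending j d = ∅ := by
  rw [Finset.eq_empty_iff_forall_notMem]
  intro e he
  simp only [pending, Finset.mem_filter, Finset.mem_Icc] at he
  obtain ⟨⟨h1e, hej⟩, hdvd, hde, hdje⟩ := he
  have hmul : e * (j / e) = j := Int.mul_ediv_cancel' hdvd
  have : d * d ≤ e * (j / e) := mul_le_mul hde hdje (by omega) (by omega)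
  omega

lemma pending_step (j d : Int) (hd : 1 ≤ d) (h : d * d ≤ j) :
    ∑ e ∈ pending j d, e
      = (if d ∣ j then (if j / d ≠ d then d + j / d else d) else 0)
        + ∑ e ∈ pending j (d + 1), e := by
  have hsub : pending j (d + 1) ⊆ pending j d := by
    intro e he
    simp only [pending, Finset.mem_filter, Finset.mem_Icc] at he ⊢
    omega
  rw [← Finset.sum_sdiff hsub]
  have hdj : d ≤ j := by nlinarith
  by_cases hdvd : d ∣ j
  · have hdjd : d ≤ j / d := by rw [Int.le_ediv_iff_mul_le (by omega)]; exact h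
    have hjd1 : 1 ≤ j / d := by omega
    have hjdj : j / d ≤ j := by
      obtain ⟨c, hc⟩ := hdvd
      have hc' : j / d = c := by rw [hc]; exact Int.mul_ediv_cancel_left c (by omega)
      nlinarith
    have hset : pending j d \ pending j (d + 1) = if j / d = d then {d} else {d, j / d} := by
      ext e
      simp only [Finset.mem_sdiff, pending, Finset.mem_filter, Finset.mem_Icc]
      constructor
      · rintro ⟨⟨⟨h1e, hej⟩, hedvd, hde, hdje⟩, hnot⟩
        have hcase : e = d ∨ j / e = d := by
          by_contra hc
          push Not at hc
          exact hnot ⟨⟨h1e, hej⟩, hedvd, by omega, by omega⟩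
        rcases hcase with hc | hc
        · split <;> simp [hc]
        · have hmul : e * (j / e) = j := Int.mul_ediv_cancel' hedvd
          have hje : j = e * d := by rw [← hmul, hc]
          have hejd : e = j / d := by
            rw [hje]
            exact (Int.mul_ediv_cancel e (by omega : d ≠ 0)).symm
          split <;> rename_i hsp
          · simp [hejd, hsp]
          · simp [hejd]
      · intro he
        have hed2 : (1 ≤ d ∧ d ≤ j) ∧ d ∣ j ∧ d ≤ d ∧ d ≤ j / d :=
          ⟨⟨by omega, hdj⟩, hdvd, le_refl d, hdjd⟩
        obtain ⟨c, hc⟩ := hdvd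
        have hc' : j / d = c := by rw [hc]; exact Int.mul_ediv_cancel_left c (by omega)
        have hcd : c ∣ j := ⟨d, by rw [hc]; ring⟩
        have hjc : j / c = d := by
          rw [hc]; rw [mul_comm]; exact Int.mul_ediv_cancel_left d (by omega)
        have hq2 : (1 ≤ j / d ∧ j / d ≤ j) ∧ j / d ∣ j ∧ d ≤ j / d ∧ d ≤ j / (j / d) := by
          rw [hc']
          exact ⟨⟨by omega, by omega⟩, hcd, by omega, by rw [hjc]⟩
        have hememb : e = d ∨ e = j / d := by
          split at he <;> rename_i hsp
          · simp only [Finset.mem_singleton] at he; exact Or.inl he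
          · simpa using he
        rcases hememb with rfl | rfl
        · exact ⟨hed2, fun hh => by omega⟩
        · refine ⟨hq2, fun hh => ?_⟩
          rw [hc'] at hh
          rw [hc', hjc] at hq2
          have := hh.2.2.2
          rw [hjc] at this
          omega
    rw [hset]
    by_cases hsp : j / d = d
    · simp [hsp, hdvd]
    · rw [if_neg hsp, Finset.sum_pair (by omega : d ≠ j / d)]
      simp [hdvd, hsp]
  · have hset : pending j d \ pending j (d + 1) = ∅ := by
      rw [Finset.sdiff_eq_empty_iff_subset]
      intro e he
      simp only [pending, Finset.mem_filter, Finset.mem_Icc] at he ⊢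
      obtain ⟨⟨h1e, hej⟩, hedvd, hde, hdje⟩ := he
      have hed : e ≠ d := fun hc => hdvd (hc ▸ hedvd)
      have hjed : j / e ≠ d := by
        intro hc
        have hmul : e * (j / e) = j := Int.mul_ediv_cancel' hedvd
        exact hdvd ⟨e, by rw [← hmul, hc]; ring⟩
      exact ⟨⟨h1e, hej⟩, hedvd, by omega, by omega⟩
    rw [hset]
    simp [hdvd]

lemma sigmaGo_spec (i d s : Int) (hd : 1 ≤ d) :
    sigmaGo i d s = s + ∑ e ∈ pending i d, e := by
  revert hd
  fun_induction sigmaGo i d s with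
  | case1 d s h ih =>
    intro hd
    simp only [dite_eq_ite] at ih
    rw [ih (by omega)]
    rw [pending_step i d hd h]
    simp only [PySem.Int.mod_eq_zero_iff_dvd,
      PySem.Int.floordiv_eq_ediv_of_pos (by omega : (0:Int) < d)]
    split_ifs <;> ring
  | case2 d s h =>
    intro hd
    rw [pending_empty i d hd h]
    simp

lemma sigma_eq_divSum (j : Int) : sigmaGo j 1 0 = divSum j := by
  rw [sigmaGo_spec j 1 0 le_rfl, divSum, ← Finset.sum_filter]
  rw [zero_add]
  congr 1
  unfold pending
  apply Finset.filter_congr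
  intro e he
  simp only [Finset.mem_Icc] at he
  constructor
  · intro h; exact h.1
  · intro h
    refine ⟨h, by omega, ?_⟩
    rw [Int.le_ediv_iff_mul_le (by omega : (0:Int) < e)]
    omega

lemma sum_Icc_one_eq_sum_range (m : Int) (g : Int → Int) :
    ∑ e ∈ Finset.Icc 1 m, g e = ∑ k ∈ Finset.range m.toNat, g (1 + k) := by
  have hinj : Function.Injective (fun k : Nat => 1 + (k : Int)) := by
    intro a b hab
    simp only at hab
    omega
  have hset : Finset.Icc (1:Int) m
      = (Finset.range m.toNat).map ⟨fun k : Nat => 1 + (k : Int), hinj⟩ := by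
    ext e
    simp only [Finset.mem_Icc, Finset.mem_map, Finset.mem_range, Function.Embedding.coeFn_mk]
    constructor
    · intro he
      refine ⟨(e - 1).toNat, by omega, by omega⟩
    · rintro ⟨k, hk, rfl⟩
      omega
  rw [hset, Finset.sum_map]
  rfl

lemma table_term (n j e : Int) (hjn : j ≤ n) (he : 1 ≤ e) :
    (if j ∈ PySem.List.pyRange e (n + 1) e then e else 0)
      = if e ∣ j ∧ e ≤ j then e else 0 := by
  by_cases hc : e ∣ j ∧ e ≤ j
  · rw [if_pos, if_pos hc]
    rw [PySem.List.mem_pyRange_iff_of_pos (by omega : (0:Int) < e)]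
    exact ⟨hc.2, by omega, dvd_sub hc.1 dvd_rfl⟩
  · rw [if_neg, if_neg hc]
    intro hmem
    obtain ⟨h1, _, h3⟩ := (PySem.List.mem_pyRange_iff_of_pos (by omega : (0:Int) < e) j).1 hmem
    have hdv : e ∣ j := by
      have := dvd_add h3 (dvd_refl e)
      simpa using this
    exact hc ⟨hdv, h1⟩

lemma table_sum (n j : Int) (hjn : j ≤ n) :
    ((PySem.List.pyRange 1 (n + 1) 1).map
        (fun i => if j ∈ PySem.List.pyRange i (n + 1) i then i else 0)).sum = divSum j := by
  have hstep0 : divSum j = ∑ e ∈ Finset.Icc 1 j, if e ∣ j ∧ e ≤ j then e else 0 := by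
    rw [divSum]
    apply Finset.sum_congr rfl
    intro e he
    simp only [Finset.mem_Icc] at he
    by_cases hd : e ∣ j
    · rw [if_pos hd, if_pos ⟨hd, he.2⟩]
    · rw [if_neg hd, if_neg (fun hh => hd hh.1)]
  have hstep1 : divSum j = ∑ e ∈ Finset.Icc 1 n, if e ∣ j ∧ e ≤ j then e else 0 := by
    rw [hstep0]
    apply Finset.sum_subset (Finset.Icc_subset_Icc_right hjn)
    intro e he hne
    simp only [Finset.mem_Icc] at he hne
    rw [if_neg]
    intro hh
    omega
  rw [hstep1, sum_Icc_one_eq_sum_range n]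
  rw [PySem.List.pyRange_one]
  have hn1 : (n + 1 - 1) = n := by ring
  rw [hn1, List.map_map, ← List.toFinset_range, List.sum_toFinset _ List.nodup_range]
  refine congrArg List.sum (List.map_congr_left ?_)
  intro k _
  simp only [Function.comp]
  exact table_term n j (1 + k) hjn (by omega)

lemma find?_congr_mem {α : Type} (xs : List α) (p q : α → Bool)
    (h : ∀ x ∈ xs, p x = q x) : xs.find? p = xs.find? q := by
  induction xs with
  | nil => rfl
  | cons x xs ih =>
    simp only [List.find?_cons, h x (by simp)]
    cases hq : q x
    · simp [ih (fun y hy => h y (by simp [hy]))]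
    · simp

-- ===== VERDICT (by name: the statement is the Claim_ definition above) =====
theorem f_spec : Claim_equal_f := by
  intro n _hdom hpre
  have hn : 0 ≤ n := hpre
  show f n = f_alt n
  obtain ⟨hlen, hpt⟩ := outer_fold n (PySem.List.pyRange 1 (n + 1) 1)
      (Array.replicate (n + 1).toNat 0)
      (fun i hi => (PySem.List.mem_pyRange_one.mp hi).1)
      (by simp; omega)
  set L := (PySem.List.pyRange 1 (n + 1) 1).foldl
      (fun l i =>
        (PySem.List.pyRange i (n + 1) i).foldl
          (fun (l : Array Int) j => Array.setIfInBounds l j.toNat (l.getD j.toNat 0 + i)) l)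
      (Array.replicate (n + 1).toNat 0) with hLdef
  have hLlen : (L.size : Int) = n + 1 := by
    rw [hlen]; simp; omega
  have hfind : (PySem.List.pyRange 0 (L.size : Int) 1).find?
        (fun i => decide (n ≤ L.getD i.toNat 0))
      = (PySem.List.pyRange 0 (n + 1) 1).find? (fun i => decide (n ≤ sigmaGo i 1 0)) := by
    rw [hLlen]
    apply find?_congr_mem
    intro j hj
    obtain ⟨hj0, hjlt⟩ := PySem.List.mem_pyRange_one.mp hj
    have hval := hpt j.toNat
    rw [getD_replicate, zero_add] at hval
    have hjj : ((j.toNat : Int)) = j := Int.toNat_of_nonneg hj0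
    simp only [hjj] at hval
    rw [hval, table_sum n j (by omega), ← sigma_eq_divSum j]
  unfold f f_alt
  show (match (PySem.List.pyRange 0 (L.size : Int) 1).find?
        (fun i => decide (n ≤ L.getD i.toNat 0)) with
      | some i => i
      | none => 0)
    = (match (PySem.List.pyRange 0 (n + 1) 1).find? (fun i => decide (n ≤ sigmaGo i 1 0)) with
      | some i => i
      | none => 0)
  rw [hfind]
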